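-- pv_equiv track=rewrite | github.com/FellipeFelix06/Algoritmo-criptografia-AES | aes/main.py | campo_finito
-- ===== SOURCE A (Python) =====
-- def campo_finito(a, b):
--     p = 0
--     for i in range(8):
--         if b & 1: # se o bit menos significativo for 1
--             p ^= a # faz xor com a e acumula em p
--         menos_sigf = a & 0x80 # verifica se o bit 7 é 1
--         a = (a << 1) & 0xFF # desloca um bit a esquerda
--         if menos_sigf:
--             a ^= 0x1B # se passar dos 8 bits faz o xor
--         b >>= 1 # desloca 1 bita para a direita
--     return p
-- ===== SOURCE B (Python) =====
-- def campo_finito(a, b):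
--     # two-pass: precompute the 8 successive xtime-doubled values of a,
--     # then select/XOR those whose bit of b is set
--     vals = []
--     v = a
--     for _ in range(8):
--         vals.append(v)
--         v = ((v << 1) & 0xFF) ^ (0x1B if v & 0x80 else 0)
--     p = 0
--     for i in range(8):
--         if (b >> i) & 1:
--             p ^= vals[i]
--     return p
-- ===== Notes on version B (the rewrite author's own statement) =====
-- stated objective: alternative
-- what changed: Replaces the single interleaved loop mutating (p,a,b) with two passes: one pass precomputes the 8 doubled values of a, a second pass selects them by the bits of b via (b>>i)&1.
import Mathlib
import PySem

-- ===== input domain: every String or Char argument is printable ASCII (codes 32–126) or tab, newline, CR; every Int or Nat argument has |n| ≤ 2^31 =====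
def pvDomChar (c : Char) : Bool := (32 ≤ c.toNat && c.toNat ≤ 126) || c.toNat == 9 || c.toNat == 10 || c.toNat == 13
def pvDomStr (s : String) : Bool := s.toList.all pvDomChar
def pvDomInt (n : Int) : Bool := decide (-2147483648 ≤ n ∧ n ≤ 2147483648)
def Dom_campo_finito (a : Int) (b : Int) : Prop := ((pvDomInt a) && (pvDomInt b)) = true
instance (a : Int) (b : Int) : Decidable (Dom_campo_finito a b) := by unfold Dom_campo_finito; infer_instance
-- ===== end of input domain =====

-- B replaces A's single interleaved loop by two passes (precompute the 8 doubled
-- values of a, then select them by the bits of b); same cost, alternative decomposition.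

-- ===== PORT A =====
-- the body of A's for-loop, acting on the state (p, a, b)
def cfBody (s : Int × Int × Int) (_i : Int) : Int × Int × Int :=
  let p := s.1
  let a := s.2.1
  let b := s.2.2
  let p := if PySem.Int.band b 1 ≠ 0 then PySem.Int.bxor p a else p
  let menos_sigf := PySem.Int.band a 0x80
  let a := PySem.Int.band (a <<< (1:Nat)) 0xFF
  let a := if menos_sigf ≠ 0 then PySem.Int.bxor a 0x1B else a
  (p, a, b >>> (1:Nat))

-- literal port of A: one loop over range(8) mutating (p, a, b)
def campo_finito (a : Int) (b : Int) : Int :=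
  ((PySem.List.pyRange 0 8 1).foldl cfBody (0, a, b)).1

-- ===== PORT B =====
-- helper of B: one xtime doubling step
def cfDouble (v : Int) : Int :=
  PySem.Int.bxor (PySem.Int.band (v <<< (1:Nat)) 0xFF)
    (if PySem.Int.band v 0x80 ≠ 0 then 0x1B else 0)

-- literal port of B (Source B): build the list `vals` of doubled values, then combine by bits of b
def campo_finito_alt (a : Int) (b : Int) : Int :=
  let vals := ((PySem.List.pyRange 0 8 1).foldl
      (fun (s : List Int × Int) _ => (s.1 ++ [s.2], cfDouble s.2)) ([], a)).1
  (PySem.List.pyRange 0 8 1).foldl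
      (fun (p : Int) (i : Int) =>
        if PySem.Int.band (b >>> i.toNat) 1 ≠ 0 then PySem.Int.bxor p (vals.getD i.toNat 0) else p) 0

-- ===== PRECONDITION & SPEC =====
def Spec_campo_finito (a : Int) (b : Int) (out : Int) : Prop := out = campo_finito_alt a b
instance (a : Int) (b : Int) (out : Int) : Decidable (Spec_campo_finito a b out) := by unfold Spec_campo_finito; infer_instance

-- ===== CLAIM (what is proved, stated in full; the proofs are below) =====
def Claim_equal_campo_finito : Prop := ∀ (a : Int) (b : Int), Dom_campo_finito a b → Spec_campo_finito a b (campo_finito a b)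

-- ===== LEMMAS AND PROOFS =====

-- fuel form of A's loop (the element of the range is ignored by cfBody)
def cfLoopA : Nat → Int × Int × Int → Int × Int × Int
  | 0, s => s
  | n+1, s => cfLoopA n (cfBody s 0)

-- the i-th doubled value of a (B's vals[i])
def cfChain (a : Int) : Nat → Int
  | 0 => a
  | n+1 => cfChain (cfDouble a) n

-- A's conditional XOR with 0x1B equals XORing a conditional constant (B's form)
theorem cf_if_xor (c : Prop) [Decidable c] (x : Int) :
    (if c then PySem.Int.bxor x 27 else x) = PySem.Int.bxor x (if c then 27 else 0) := by
  split <;> simp [PySem.Int.bxor_zero]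

theorem cf_range8 : PySem.List.pyRange 0 8 1 = [0,1,2,3,4,5,6,7] := by decide

theorem cfBody_eq (p a b x : Int) :
    cfBody (p, a, b) x =
      ((if PySem.Int.band b 1 ≠ 0 then PySem.Int.bxor p a else p), cfDouble a, b >>> (1:Nat)) := by
  simp only [cfBody, cfDouble, cf_if_xor]

theorem cf_foldl_eq_loopA (l : List Int) (s : Int × Int × Int) :
    l.foldl cfBody s = cfLoopA l.length s := by
  induction l generalizing s with
  | nil => rfl
  | cons x xs ih => rw [List.foldl_cons, ih]; rfl

theorem cfLoopA_fst (n : Nat) : ∀ p a b : Int,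
    (cfLoopA n (p, a, b)).1 =
      (List.range n).foldl
        (fun (q : Int) (i : Nat) => if PySem.Int.band (b >>> i) 1 ≠ 0 then PySem.Int.bxor q (cfChain a i) else q) p := by
  induction n with
  | zero => intro p a b; rfl
  | succ n ih =>
    intro p a b
    show (cfLoopA n (cfBody (p, a, b) 0)).1 = _
    rw [cfBody_eq, ih, List.range_succ_eq_map, List.foldl_cons, List.foldl_map]
    have h1 : ∀ i : Nat, (b >>> (1:Nat)) >>> i = b >>> (i + 1) := by
      intro i; rw [← Int.shiftRight_add, Nat.add_comm]
    have h2 : ∀ i : Nat, cfChain (cfDouble a) i = cfChain a (i + 1) := fun _ => rfl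
    have h0 : b >>> (0:Nat) = b := Int.shiftRight_zero b
    have h3 : cfChain a 0 = a := rfl
    simp only [h1, h2, h0, h3]

theorem cf_alt_eq (a b : Int) :
    campo_finito_alt a b =
      (List.range 8).foldl
        (fun (q : Int) (i : Nat) => if PySem.Int.band (b >>> i) 1 ≠ 0 then PySem.Int.bxor q (cfChain a i) else q) 0 := by
  simp only [campo_finito_alt, cf_range8, List.foldl]
  simp [cfChain, List.range_succ]

theorem campo_finito_eq (a b : Int) : campo_finito a b = campo_finito_alt a b := by
  have hlen : (PySem.List.pyRange 0 8 1).length = 8 := by rw [cf_range8]; rfl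
  rw [campo_finito, cf_foldl_eq_loopA, hlen, cfLoopA_fst, cf_alt_eq]

-- ===== VERDICT (by name: the statement is the Claim_ definition above) =====
theorem campo_finito_spec : Claim_equal_campo_finito := by
  intro a b _
  exact campo_finito_eq a b
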